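-- pv_equiv track=rewrite | github.com/diffusion-freespace/diffusion_fs | datasets_all/fs_dataset.py | classify_situation
-- ===== SOURCE A (Python) =====
-- def classify_situation(angles):
--     if not angles:
--         return 0  # No Lane Detected
--
--     if len(angles) == 1:
--         return 1  # Single Lane Road
--
--     angle_diffs = [abs(a1 - a2) for i, a1 in enumerate(angles) for a2 in angles[i+1:]]
--
--     if all(diff < 10 for diff in angle_diffs):
--         return 2  # Multi-Lane Straight Road
--     elif any(45 <= diff <= 135 for diff in angle_diffs):
--         return 3  # Intersection Detected
--     elif any(15 <= diff <= 35 for diff in angle_diffs):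
--         return 4  # Lane Merging/Splitting
--     else:
--         return 2  # Default to Multi-Lane Straight Road
-- ===== SOURCE B (Python) =====
-- def classify_situation(angles):
--     if not angles:
--         return 0  # No Lane Detected
--     if len(angles) == 1:
--         return 1  # Single Lane Road
--     s = sorted(angles)
--     if s[len(s) - 1] - s[0] < 10:
--         return 2  # all pairwise gaps are below 10 iff the total spread is
--     if _has_pair(s, 45, 135):
--         return 3
--     if _has_pair(s, 15, 35):
--         return 4
--     return 2
--
-- def _has_pair(s, lo, hi):
--     # on a sorted list: is there a pair whose gap lies in [lo, hi]?
--     for x in s: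
--         y = next((v for v in s if v >= x + lo), None)
--         if y is not None and y <= x + hi:
--             return True
--     return False
-- ===== Notes on version B (the rewrite author's own statement) =====
-- stated objective: faster
-- what changed: Instead of materialising all O(n^2) pairwise |differences| and scanning that list three times, B sorts the angles once, decides the all-below-10 test by the single spread last-first, and decides each window test by looking, per element x, for the first sorted value >= x+lo, with early exit.
import Mathlib
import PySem

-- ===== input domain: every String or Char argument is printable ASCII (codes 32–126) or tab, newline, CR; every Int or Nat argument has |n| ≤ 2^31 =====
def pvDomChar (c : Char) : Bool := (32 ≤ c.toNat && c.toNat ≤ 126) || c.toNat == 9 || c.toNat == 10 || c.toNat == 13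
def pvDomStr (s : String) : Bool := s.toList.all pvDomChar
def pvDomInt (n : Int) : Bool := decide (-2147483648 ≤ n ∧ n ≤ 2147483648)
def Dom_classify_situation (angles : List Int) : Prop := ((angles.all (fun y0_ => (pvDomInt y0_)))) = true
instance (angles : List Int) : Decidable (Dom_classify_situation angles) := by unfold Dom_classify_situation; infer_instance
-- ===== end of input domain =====

-- B sorts once and decides the tests on the sorted list (spread / first-value-≥ scans)
-- instead of building A's quadratic list of pairwise differences; return values proved equal.

-- ===== PORT A =====
def classify_situation (angles : List Int) : Int :=
  if angles = [] then 0
  else if angles.length = 1 then 1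
  else
    let angle_diffs := (PySem.List.enumerate angles).flatMap
      (fun ia => (PySem.List.slice angles (some (ia.1 + 1)) none).map (fun a2 => |ia.2 - a2|))
    if angle_diffs.all (fun d => decide (d < 10)) then 2
    else if angle_diffs.any (fun d => decide (45 ≤ d ∧ d ≤ 135)) then 3
    else if angle_diffs.any (fun d => decide (15 ≤ d ∧ d ≤ 35)) then 4
    else 2

-- ===== PORT B =====
-- on a sorted list: is there a pair whose gap lies in [lo, hi]? (Source B's _has_pair)
def hasPairWindow (s : List Int) (lo hi : Int) : Bool :=
  s.any (fun x =>
    match s.find? (fun v => decide (x + lo ≤ v)) with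
    | some y => decide (y ≤ x + hi)
    | none => false)

def classify_situation_alt (angles : List Int) : Int :=
  if angles = [] then 0
  else if angles.length = 1 then 1
  else
    let s := PySem.List.sorted angles (fun x => x) false
    if s.getLastD 0 - s.headD 0 < 10 then 2
    else if hasPairWindow s 45 135 then 3
    else if hasPairWindow s 15 35 then 4
    else 2

-- ===== PRECONDITION & SPEC =====
def Spec_classify_situation (angles : List Int) (out : Int) : Prop := out = classify_situation_alt angles
instance (angles : List Int) (out : Int) : Decidable (Spec_classify_situation angles out) := by unfold Spec_classify_situation; infer_instance

-- ===== CLAIM (what is proved, stated in full; the proofs are below) =====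
def Claim_equal_classify_situation : Prop := ∀ (angles : List Int), Dom_classify_situation angles → Spec_classify_situation angles (classify_situation angles)

-- ===== LEMMAS AND PROOFS =====

-- A's comprehension, written structurally: for x :: xs, the diffs of x with everything after it, then recurse.
def pairDiffs : List Int → List Int
  | [] => []
  | x :: xs => xs.map (fun y => |x - y|) ++ pairDiffs xs

-- A's enumerate/slice comprehension equals pairDiffs
theorem diffs_eq_aux (l : List Int) : ∀ (xs : List Int) (s : Nat), l.drop s = xs →
    (PySem.List.enumerate xs (s : Int)).flatMap
      (fun ia => (PySem.List.slice l (some (ia.1 + 1)) none).map (fun a2 => |ia.2 - a2|))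
    = pairDiffs xs := by
  intro xs
  induction xs with
  | nil => intro s h; simp [PySem.List.enumerate, pairDiffs]
  | cons x t ih =>
    intro s h
    have hdrop : l.drop (s + 1) = t := by
      have := congrArg List.tail h
      simpa [List.tail_drop] using this
    have hcast : ((s : Int) + 1) = ((s + 1 : Nat) : Int) := by push_cast; ring
    have hx : PySem.List.slice l (some ((s : Int) + 1)) none = t := by
      rw [hcast, PySem.List.slice_from_natCast, hdrop]
    rw [PySem.List.enumerate_cons, List.flatMap_cons]
    simp only [pairDiffs, hx]
    rw [hcast, ih (s + 1) hdrop]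

theorem diffsA_eq (l : List Int) :
    (PySem.List.enumerate l).flatMap
      (fun ia => (PySem.List.slice l (some (ia.1 + 1)) none).map (fun a2 => |ia.2 - a2|))
    = pairDiffs l := by
  simpa using diffs_eq_aux l l 0 rfl

theorem all_pairDiffs (p : Int → Bool) (l : List Int) :
    (pairDiffs l).all p = true ↔ ∀ a b : Int, [a, b].Sublist l → p |a - b| = true := by
  induction l with
  | nil =>
    constructor
    · intro _ a b hab
      exact absurd (List.Sublist.length_le hab) (by simp)
    · intro _; simp [pairDiffs]
  | cons x t ih =>
    simp only [pairDiffs, List.all_append, List.all_map, Bool.and_eq_true, ih, List.all_eq_true]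
    constructor
    · rintro ⟨h1, h2⟩ a b hab
      rcases List.sublist_cons_iff.mp hab with h | ⟨r, hr, hrs⟩
      · exact h2 a b h
      · cases hr
        exact h1 b (List.singleton_sublist.mp hrs)
    · intro h
      refine ⟨fun y hy => ?_, fun a b hab => h a b (hab.trans (List.sublist_cons_self x t))⟩
      exact h x y (List.cons_sublist_cons.mpr (List.singleton_sublist.mpr hy))

theorem any_pairDiffs (p : Int → Bool) (l : List Int) :
    (pairDiffs l).any p = true ↔ ∃ a b : Int, [a, b].Sublist l ∧ p |a - b| = true := by
  induction l with
  | nil =>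
    simp only [pairDiffs, List.any_nil]
    constructor
    · intro h; cases h
    · rintro ⟨a, b, hab, _⟩
      exact absurd (List.Sublist.length_le hab) (by simp)
  | cons x t ih =>
    simp only [pairDiffs, List.any_append, List.any_map, Bool.or_eq_true, ih, List.any_eq_true]
    constructor
    · rintro (⟨y, hy, hpy⟩ | ⟨a, b, hab, hp⟩)
      · exact ⟨x, y, List.cons_sublist_cons.mpr (List.singleton_sublist.mpr hy), hpy⟩
      · exact ⟨a, b, hab.trans (List.sublist_cons_self x t), hp⟩
    · rintro ⟨a, b, hab, hp⟩
      rcases List.sublist_cons_iff.mp hab with h | ⟨r, hr, hrs⟩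
      · exact Or.inr ⟨a, b, h, hp⟩
      · cases hr
        exact Or.inl ⟨b, List.singleton_sublist.mp hrs, hp⟩

theorem mem_mem_ne_sublist {a b : Int} {l : List Int} (ha : a ∈ l) (hb : b ∈ l) (hab : a ≠ b) :
    [a, b].Sublist l ∨ [b, a].Sublist l := by
  induction l with
  | nil => cases ha
  | cons c t ih =>
    rcases List.mem_cons.mp ha with rfl | hat
    · have hbt : b ∈ t := by
        rcases List.mem_cons.mp hb with rfl | h
        · exact absurd rfl hab
        · exact h
      exact Or.inl (List.cons_sublist_cons.mpr (List.singleton_sublist.mpr hbt))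
    · rcases List.mem_cons.mp hb with rfl | hbt
      · exact Or.inr (List.cons_sublist_cons.mpr (List.singleton_sublist.mpr hat))
      · rcases ih hat hbt with h | h
        · exact Or.inl (h.trans (List.sublist_cons_self c t))
        · exact Or.inr (h.trans (List.sublist_cons_self c t))

theorem le_getLastD {l : List Int} (hs : l.Pairwise (· ≤ ·)) {x : Int} (hx : x ∈ l) (d : Int) :
    x ≤ l.getLastD d := by
  induction l generalizing x d with
  | nil => cases hx
  | cons c t ih =>
    rcases List.mem_cons.mp hx with rfl | hxt
    · cases t with
      | nil => simp
      | cons u s =>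
        have hmem : u ∈ u :: s := List.mem_cons_self ..
        have hcu : x ≤ u := (List.pairwise_cons.mp hs).1 u hmem
        have hrec : u ≤ (u :: s).getLastD x := ih (List.pairwise_cons.mp hs).2 hmem x
        calc x ≤ (u :: s).getLastD x := le_trans hcu hrec
          _ = (x :: u :: s).getLastD d := by conv_rhs => rw [List.getLastD_cons]
    · calc x ≤ t.getLastD c := ih (List.pairwise_cons.mp hs).2 hxt c
        _ = (c :: t).getLastD d := by conv_rhs => rw [List.getLastD_cons]

theorem find?_sorted_le {l : List Int} (hs : l.Pairwise (· ≤ ·)) (p : Int → Bool) {y₀ b : Int}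
    (hf : l.find? p = some y₀) (hb : b ∈ l) (hpb : p b = true) : y₀ ≤ b := by
  induction l with
  | nil => cases hf
  | cons c t ih =>
    rw [List.find?_cons] at hf
    by_cases hc : p c = true
    · rw [hc] at hf
      injection hf with hf; subst hf
      rcases List.mem_cons.mp hb with rfl | hbt
      · exact le_refl _
      · exact (List.pairwise_cons.mp hs).1 b hbt
    · rw [Bool.not_eq_true] at hc
      rw [hc] at hf
      rcases List.mem_cons.mp hb with rfl | hbt
      · exact absurd hpb (by simp [hc])
      · exact ih (List.pairwise_cons.mp hs).2 hf hbt

theorem hasPairWindow_iff {s : List Int} (hs : s.Pairwise (· ≤ ·)) {lo hi : Int} (hlo : 0 < lo) :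
    hasPairWindow s lo hi = true ↔ ∃ a b : Int, [a, b].Sublist s ∧ lo ≤ |a - b| ∧ |a - b| ≤ hi := by
  unfold hasPairWindow
  rw [List.any_eq_true]
  constructor
  · rintro ⟨x, hx, hmx⟩
    rcases hfind : s.find? (fun v => decide (x + lo ≤ v)) with _ | y
    · rw [hfind] at hmx; cases hmx
    · rw [hfind] at hmx
      have hy : y ∈ s := List.mem_of_find?_eq_some hfind
      have hylo : x + lo ≤ y := by simpa using List.find?_some hfind
      have hyhi : y ≤ x + hi := by simpa using hmx
      have hne : x ≠ y := by intro h; omega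
      have habs : |x - y| = y - x := by
        rw [abs_sub_comm]; exact abs_of_nonneg (by omega)
      rcases mem_mem_ne_sublist hx hy hne with h | h
      · exact ⟨x, y, h, by rw [habs]; omega⟩
      · exact ⟨y, x, h, by rw [abs_sub_comm, habs]; omega⟩
  · rintro ⟨a, b, hab, h1, h2⟩
    have ha : a ∈ s := hab.subset (by simp)
    have hb : b ∈ s := hab.subset (by simp)
    have hle : a ≤ b := List.pairwise_iff_forall_sublist.mp hs hab
    have habs : |a - b| = b - a := by
      rw [abs_sub_comm]; exact abs_of_nonneg (by omega)
    rw [habs] at h1 h2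
    have hsome : (s.find? (fun v => decide (a + lo ≤ v))).isSome := by
      rw [List.find?_isSome]
      refine ⟨b, hb, by simp; omega⟩
    rcases hfind : s.find? (fun v => decide (a + lo ≤ v)) with _ | y
    · rw [hfind] at hsome; cases hsome
    · refine ⟨a, ha, ?_⟩
      rw [hfind]
      have := find?_sorted_le hs _ hfind hb (by simp; omega)
      simp; omega

theorem pair_perm_transfer (W : Int → Int → Prop) (hW : ∀ a b, W a b ↔ W b a)
    {l l' : List Int} (hp : l.Perm l') :
    (∃ a b : Int, [a, b].Sublist l ∧ W a b) ↔ (∃ a b : Int, [a, b].Sublist l' ∧ W a b) := by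
  have key : ∀ {l₁ l₂ : List Int}, l₁.Perm l₂ →
      (∃ a b : Int, [a, b].Sublist l₁ ∧ W a b) → (∃ a b : Int, [a, b].Sublist l₂ ∧ W a b) := by
    rintro l₁ l₂ hperm ⟨a, b, hab, hw⟩
    by_contra hno
    push Not at hno
    have hpair : l₂.Pairwise (fun u v => ¬ W u v ∧ ¬ W v u) := by
      rw [List.pairwise_iff_forall_sublist]
      intro u v huv
      exact ⟨hno u v huv, fun h => hno u v huv ((hW v u).mp h)⟩
    have hpair1 : l₁.Pairwise (fun u v => ¬ W u v ∧ ¬ W v u) :=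
      (hperm.pairwise_iff (fun h => ⟨h.2, h.1⟩)).mpr hpair
    exact (List.pairwise_iff_forall_sublist.mp hpair1 hab).1 hw
  exact ⟨key hp, key hp.symm⟩

theorem spread_iff {l : List Int} (hl : 2 ≤ l.length) :
    (∀ a b : Int, [a, b].Sublist l → |a - b| < 10) ↔
      ((PySem.List.sorted l (fun x => x) false).getLastD 0
        - (PySem.List.sorted l (fun x => x) false).headD 0 < 10) := by
  have hperm : (PySem.List.sorted l (fun x => x) false).Perm l := PySem.List.sorted_perm l (fun x => x) false
  have hpw : (PySem.List.sorted l (fun x => x) false).Pairwise (fun a b : Int => a ≤ b) := PySem.List.sorted_pairwise l (fun x => x)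
  set s := PySem.List.sorted l (fun x => x) false with hsdef
  have hlen : 2 ≤ s.length := by rw [hperm.length_eq]; exact hl
  have htrans : (∀ a b : Int, [a, b].Sublist l → |a - b| < 10) ↔
      (∀ a b : Int, [a, b].Sublist s → |a - b| < 10) := by
    rw [← List.pairwise_iff_forall_sublist, ← List.pairwise_iff_forall_sublist]
    exact (hperm.pairwise_iff (fun h => by rw [abs_sub_comm]; exact h)).symm
  rw [htrans]
  match s, hlen with
  | h :: u :: r, _ =>
    have hmemgl : (u :: r).getLastD h ∈ u :: r := by
      rw [List.getLastD_eq_getLast?]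
      rcases hg : (u :: r).getLast? with _ | g
      · simp at hg
      · simpa using List.mem_of_getLast? hg
    constructor
    · intro hall
      have hsub : [h, (u :: r).getLastD h].Sublist (h :: u :: r) :=
        List.cons_sublist_cons.mpr (List.singleton_sublist.mpr hmemgl)
      have h1 := hall _ _ hsub
      have h2 : h ≤ (u :: r).getLastD h :=
        (List.pairwise_cons.mp hpw).1 _ hmemgl
      have habs : |h - (u :: r).getLastD h| = (u :: r).getLastD h - h := by
        rw [abs_sub_comm]; exact abs_of_nonneg (by omega)
      rw [habs] at h1
      simp only [List.getLastD_cons, List.headD_cons] at h1 h2 ⊢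
      omega
    · intro hsp a b hab
      have hle : a ≤ b := List.pairwise_iff_forall_sublist.mp hpw hab
      have ha : a ∈ h :: u :: r := hab.subset (by simp)
      have hb : b ∈ h :: u :: r := hab.subset (by simp)
      have hha : h ≤ a := by
        rcases List.mem_cons.mp ha with rfl | h' 
        · exact le_refl _
        · exact (List.pairwise_cons.mp hpw).1 _ h'
      have hbl : b ≤ (h :: u :: r).getLastD 0 := le_getLastD hpw hb 0
      simp only [List.getLastD_cons, List.headD_cons] at hsp hbl ⊢
      have habs : |a - b| = b - a := by rw [abs_sub_comm]; exact abs_of_nonneg (by omega)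
      rw [habs]
      omega

-- ===== VERDICT (by name: the statement is the Claim_ definition above) =====
theorem classify_situation_spec : Claim_equal_classify_situation := by
  intro angles _
  unfold Spec_classify_situation classify_situation classify_situation_alt
  by_cases h0 : angles = []
  · rw [if_pos h0, if_pos h0]
  · rw [if_neg h0, if_neg h0]
    by_cases h1 : angles.length = 1
    · rw [if_pos h1, if_pos h1]
    · rw [if_neg h1, if_neg h1]
      have hlen : 2 ≤ angles.length := by
        have h0' : angles.length ≠ 0 := by simpa using h0
        omega
      have hperm : (PySem.List.sorted angles (fun x => x) false).Perm angles :=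
        PySem.List.sorted_perm angles (fun x => x) false
      have hpw : (PySem.List.sorted angles (fun x => x) false).Pairwise (· ≤ ·) := by
        simpa using PySem.List.sorted_pairwise angles (fun x => x)
      have c1 : ((PySem.List.enumerate angles).flatMap
            (fun ia => (PySem.List.slice angles (some (ia.1 + 1)) none).map
              (fun a2 => |ia.2 - a2|))).all (fun d => decide (d < 10)) = true ↔
          ((PySem.List.sorted angles (fun x => x) false).getLastD 0
            - (PySem.List.sorted angles (fun x => x) false).headD 0 < 10) := by
        rw [diffsA_eq, all_pairDiffs]
        simp only [decide_eq_true_eq]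
        exact spread_iff hlen
      have c2 : ((PySem.List.enumerate angles).flatMap
            (fun ia => (PySem.List.slice angles (some (ia.1 + 1)) none).map
              (fun a2 => |ia.2 - a2|))).any (fun d => decide (45 ≤ d ∧ d ≤ 135)) = true ↔
          hasPairWindow (PySem.List.sorted angles (fun x => x) false) 45 135 = true := by
        rw [diffsA_eq, any_pairDiffs, hasPairWindow_iff hpw (by norm_num)]
        simp only [decide_eq_true_eq]
        exact pair_perm_transfer (fun a b => 45 ≤ |a - b| ∧ |a - b| ≤ 135)
          (fun a b => by show 45 ≤ |a - b| ∧ |a - b| ≤ 135 ↔ 45 ≤ |b - a| ∧ |b - a| ≤ 135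
                         rw [abs_sub_comm]) hperm.symm
      have c3 : ((PySem.List.enumerate angles).flatMap
            (fun ia => (PySem.List.slice angles (some (ia.1 + 1)) none).map
              (fun a2 => |ia.2 - a2|))).any (fun d => decide (15 ≤ d ∧ d ≤ 35)) = true ↔
          hasPairWindow (PySem.List.sorted angles (fun x => x) false) 15 35 = true := by
        rw [diffsA_eq, any_pairDiffs, hasPairWindow_iff hpw (by norm_num)]
        simp only [decide_eq_true_eq]
        exact pair_perm_transfer (fun a b => 15 ≤ |a - b| ∧ |a - b| ≤ 35)
          (fun a b => by show 15 ≤ |a - b| ∧ |a - b| ≤ 35 ↔ 15 ≤ |b - a| ∧ |b - a| ≤ 35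
                         rw [abs_sub_comm]) hperm.symm
      exact if_congr c1 rfl (if_congr c2 rfl (if_congr c3 rfl rfl))
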